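-- pv_equiv track=rewrite | github.com/ioyarzun/Modelais | modelais/utils.py | get_possible_structures
-- ===== SOURCE A (Python) =====
-- def get_possible_structures(chain_in_current_complex, similar_chains,structures, used_pairs, clashing):
--     """
--     Taking into account the clashing, previous attemps (used_pairs) and chains
--     similarity, this function selects the structures that may be included in
--     the current complex.
--     """
--     possible_structures = {}
--     if chain_in_current_complex in similar_chains:
--         for similar_chain in similar_chains[chain_in_current_complex]:
--             for tuple_key in structures:
--                 if similar_chain in tuple_key:
--                     if tuple_key not in used_pairs:
--                         if tuple_key not in clashing:
--                             possible_structures[similar_chain] = (tuple_key)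
--
--     return possible_structures
-- ===== SOURCE B (Python) =====
-- def get_possible_structures(chain_in_current_complex, similar_chains, structures, used_pairs, clashing):
--     """
--     Index the eligible structures by chain element once (keeping the last
--     eligible structure per chain), then answer each similar chain by lookup.
--     """
--     if chain_in_current_complex not in similar_chains:
--         return {}
--     banned = {tuple(pair) for pair in used_pairs}
--     banned.update(tuple(pair) for pair in clashing)
--     last_for_chain = {}
--     for tuple_key in structures:
--         if tuple(tuple_key) not in banned:
--             for chain in tuple_key:
--                 last_for_chain[chain] = tuple_key
--     possible_structures = {}
--     for similar_chain in similar_chains[chain_in_current_complex]: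
--         if similar_chain in last_for_chain:
--             possible_structures[similar_chain] = last_for_chain[similar_chain]
--     return possible_structures
-- ===== Notes on version B (the rewrite author's own statement) =====
-- stated objective: alternative
-- what changed: Instead of scanning all structures (with linear used/clashing membership tests) for every similar chain, B hashes the banned pairs into a set, builds a chain->last-eligible-structure index in one pass over the structures, and answers each similar chain by one dictionary lookup.
import Mathlib
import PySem

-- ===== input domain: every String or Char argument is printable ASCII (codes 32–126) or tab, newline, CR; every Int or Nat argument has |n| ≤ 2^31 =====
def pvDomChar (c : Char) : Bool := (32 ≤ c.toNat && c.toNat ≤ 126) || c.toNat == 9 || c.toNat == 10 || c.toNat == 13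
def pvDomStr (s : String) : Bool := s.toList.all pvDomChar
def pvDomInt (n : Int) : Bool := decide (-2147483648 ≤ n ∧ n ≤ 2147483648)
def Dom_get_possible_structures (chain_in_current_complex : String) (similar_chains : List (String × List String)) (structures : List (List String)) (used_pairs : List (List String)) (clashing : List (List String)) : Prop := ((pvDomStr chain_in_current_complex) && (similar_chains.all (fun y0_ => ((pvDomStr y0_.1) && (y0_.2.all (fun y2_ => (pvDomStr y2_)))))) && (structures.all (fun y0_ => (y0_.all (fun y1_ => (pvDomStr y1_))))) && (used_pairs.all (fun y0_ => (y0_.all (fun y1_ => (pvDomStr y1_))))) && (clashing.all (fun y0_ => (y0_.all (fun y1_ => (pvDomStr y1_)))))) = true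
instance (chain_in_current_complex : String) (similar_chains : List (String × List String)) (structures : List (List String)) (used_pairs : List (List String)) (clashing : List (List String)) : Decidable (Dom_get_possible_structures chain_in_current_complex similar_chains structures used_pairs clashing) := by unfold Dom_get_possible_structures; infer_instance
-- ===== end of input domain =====

-- B replaces A's per-similar-chain scan over all structures by a one-pass
-- chain->last-eligible-structure index plus a banned-pairs set (objective: alternative).

-- ===== PORT A =====
def get_possible_structures (chain_in_current_complex : String) (similar_chains : List (String × List String)) (structures : List (List String)) (used_pairs : List (List String)) (clashing : List (List String)) : List (String × List String) :=
  match (PySem.Dict.mk similar_chains).get? chain_in_current_complex with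
  | none => (PySem.Dict.empty : PySem.Dict String (List String)).items
  | some chains =>
    (chains.foldl (fun acc similar_chain =>
        structures.foldl (fun acc tuple_key =>
          if similar_chain ∈ tuple_key then
            if tuple_key ∈ used_pairs then acc
            else if tuple_key ∈ clashing then acc
            else acc.insert similar_chain tuple_key
          else acc) acc)
      (PySem.Dict.empty : PySem.Dict String (List String))).items

-- ===== PORT B =====
def get_possible_structures_alt (chain_in_current_complex : String) (similar_chains : List (String × List String)) (structures : List (List String)) (used_pairs : List (List String)) (clashing : List (List String)) : List (String × List String) :=
  match (PySem.Dict.mk similar_chains).get? chain_in_current_complex with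
  | none => (PySem.Dict.empty : PySem.Dict String (List String)).items
  | some chains =>
    let banned : PySem.Set (List String) := PySem.Set.update (PySem.Set.ofList used_pairs) clashing
    let last_for_chain : PySem.Dict String (List String) :=
      structures.foldl (fun d tuple_key =>
        if PySem.Set.contains banned tuple_key then d
        else tuple_key.foldl (fun d chain => d.insert chain tuple_key) d)
        PySem.Dict.empty
    (chains.foldl (fun res similar_chain =>
        match last_for_chain.get? similar_chain with
        | some tk => res.insert similar_chain tk
        | none => res)
      (PySem.Dict.empty : PySem.Dict String (List String))).items

-- ===== PRECONDITION & SPEC =====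
def Spec_get_possible_structures (chain_in_current_complex : String) (similar_chains : List (String × List String)) (structures : List (List String)) (used_pairs : List (List String)) (clashing : List (List String)) (out : List (String × List String)) : Prop := out = get_possible_structures_alt chain_in_current_complex similar_chains structures used_pairs clashing
instance (chain_in_current_complex : String) (similar_chains : List (String × List String)) (structures : List (List String)) (used_pairs : List (List String)) (clashing : List (List String)) (out : List (String × List String)) : Decidable (Spec_get_possible_structures chain_in_current_complex similar_chains structures used_pairs clashing out) := by unfold Spec_get_possible_structures; infer_instance

-- ===== CLAIM (what is proved, stated in full; the proofs are below) =====
def Claim_equal_get_possible_structures : Prop := ∀ (chain_in_current_complex : String) (similar_chains : List (String × List String)) (structures : List (List String)) (used_pairs : List (List String)) (clashing : List (List String)), Dom_get_possible_structures chain_in_current_complex similar_chains structures used_pairs clashing → Spec_get_possible_structures chain_in_current_complex similar_chains structures used_pairs clashing (get_possible_structures chain_in_current_complex similar_chains structures used_pairs clashing)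

-- ===== LEMMAS AND PROOFS =====

-- the "last eligible structure containing sc" computation both loops realize
def pvLast (used_pairs clashing : List (List String)) (sc : String) (structures : List (List String)) (r : Option (List String)) : Option (List String) :=
  structures.foldl (fun r tk =>
    if sc ∈ tk ∧ tk ∉ used_pairs ∧ tk ∉ clashing then some tk else r) r

def pvApp (acc : PySem.Dict String (List String)) (sc : String) : Option (List String) → PySem.Dict String (List String)
  | some tk => acc.insert sc tk
  | none => acc

lemma pvA_inner (used_pairs clashing : List (List String)) (sc : String)
    (structures : List (List String)) (acc : PySem.Dict String (List String))
    (r : Option (List String)) :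
    structures.foldl (fun acc tuple_key =>
      if sc ∈ tuple_key then
        if tuple_key ∈ used_pairs then acc
        else if tuple_key ∈ clashing then acc
        else acc.insert sc tuple_key
      else acc) (pvApp acc sc r)
    = pvApp acc sc (pvLast used_pairs clashing sc structures r) := by
  induction structures generalizing r with
  | nil => rfl
  | cons tk rest ih =>
    simp only [List.foldl_cons, pvLast] at *
    by_cases h1 : sc ∈ tk
    · by_cases h2 : tk ∈ used_pairs
      · simpa [h1, h2] using ih r
      · by_cases h3 : tk ∈ clashing
        · simpa [h1, h2, h3] using ih r
        · have : (if sc ∈ tk then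
              if tk ∈ used_pairs then pvApp acc sc r
              else if tk ∈ clashing then pvApp acc sc r
              else (pvApp acc sc r).insert sc tk
            else pvApp acc sc r) = pvApp acc sc (some tk) := by
            cases r <;> simp [h1, h2, h3, pvApp, PySem.Dict.insert_insert_self]
          rw [this]
          have := ih (some tk)
          simpa [h1, h2, h3, pvApp] using this
    · simpa [h1] using ih r

lemma pvB_elem_fold (tk : List String) (sc : String) (l : List String)
    (d : PySem.Dict String (List String)) :
    (l.foldl (fun d chain => d.insert chain tk) d).get? sc
      = if sc ∈ l then some tk else d.get? sc := by
  induction l generalizing d with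
  | nil => simp
  | cons e l ih =>
    by_cases h : sc = e
    · subst h
      by_cases h2 : sc ∈ l <;> simp [ih, h2]
    · simp [ih, PySem.Dict.get?_insert, h]

lemma pvBanned (used_pairs clashing : List (List String)) (tk : List String) :
    PySem.Set.contains (PySem.Set.update (PySem.Set.ofList used_pairs) clashing) tk
      = (decide (tk ∈ used_pairs) || decide (tk ∈ clashing)) := by
  by_cases h1 : tk ∈ used_pairs
  · simp [PySem.Set.mem_update, PySem.Set.mem_ofList, h1]
  · by_cases h2 : tk ∈ clashing
    · simp [PySem.Set.mem_update, PySem.Set.mem_ofList, h1, h2]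
    · simp only [h1, h2, decide_false, Bool.or_self]
      rw [Bool.eq_false_iff]
      intro hc
      rw [PySem.Set.contains_iff] at hc
      rw [PySem.Set.mem_update, PySem.Set.mem_ofList] at hc
      tauto

lemma pvB_index (used_pairs clashing : List (List String)) (sc : String)
    (structures : List (List String)) (d : PySem.Dict String (List String)) :
    (structures.foldl (fun d tuple_key =>
        if PySem.Set.contains (PySem.Set.update (PySem.Set.ofList used_pairs) clashing) tuple_key then d
        else tuple_key.foldl (fun d chain => d.insert chain tuple_key) d) d).get? sc
      = pvLast used_pairs clashing sc structures (d.get? sc) := by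
  induction structures generalizing d with
  | nil => rfl
  | cons tk rest ih =>
    simp only [List.foldl_cons, pvLast] at *
    rw [ih]
    congr 1
    rw [pvBanned]
    by_cases h1 : tk ∈ used_pairs
    · simp [h1]
    · by_cases h2 : tk ∈ clashing
      · simp [h1, h2]
      · by_cases h3 : sc ∈ tk <;> simp [h1, h2, h3, pvB_elem_fold]

-- ===== VERDICT (by name: the statement is the Claim_ definition above) =====
theorem get_possible_structures_spec : Claim_equal_get_possible_structures := by
  intro c sim structures used clashing _
  unfold Spec_get_possible_structures get_possible_structures get_possible_structures_alt
  cases h : (PySem.Dict.mk sim).get? c with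
  | none => rfl
  | some chains =>
    simp only [h]
    congr 2
    funext acc sc
    rw [pvB_index]
    simp only [PySem.Dict.get?_empty]
    have hA := pvA_inner used clashing sc structures acc none
    simp only [pvApp] at hA
    rw [← hA]
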